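-- pv_equiv track=rewrite | github.com/foege99/BridgeAnalytics | tests/test_opening_bid_v2_snapshot_regression.py | _find_call
-- ===== SOURCE A (Python) =====
-- def _find_call(seq, seat, call_no=1):
--     n = 0
--     for c in seq:
--         if str(c.get("dealer", "")) == seat:
--             n += 1
--             if n == call_no:
--                 return c
--     return None
-- ===== SOURCE B (Python) =====
-- def _find_call(seq, seat, call_no=1):
--     matches = [c for c in seq if str(c.get("dealer", "")) == seat]
--     if 1 <= call_no <= len(matches):
--         return matches[call_no - 1]
--     return None
-- ===== Notes on version B (the rewrite author's own statement) =====
-- stated objective: simpler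
-- what changed: Replaced A's incremental counter-with-early-exit loop by filter-then-positional-index: B materializes the list of matching calls once and returns the (call_no)-th element if it exists.
import Mathlib
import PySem

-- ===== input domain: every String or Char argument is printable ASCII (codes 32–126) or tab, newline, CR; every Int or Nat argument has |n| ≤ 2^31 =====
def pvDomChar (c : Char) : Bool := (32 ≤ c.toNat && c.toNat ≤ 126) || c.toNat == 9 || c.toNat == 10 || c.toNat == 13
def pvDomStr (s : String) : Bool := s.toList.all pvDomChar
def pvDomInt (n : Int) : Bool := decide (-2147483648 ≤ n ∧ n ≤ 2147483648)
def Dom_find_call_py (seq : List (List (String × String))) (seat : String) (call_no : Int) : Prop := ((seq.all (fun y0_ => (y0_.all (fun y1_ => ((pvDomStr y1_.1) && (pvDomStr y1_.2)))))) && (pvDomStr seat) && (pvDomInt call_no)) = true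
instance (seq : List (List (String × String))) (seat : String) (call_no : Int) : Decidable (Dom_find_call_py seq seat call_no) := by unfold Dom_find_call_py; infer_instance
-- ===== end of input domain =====

-- B replaces A's running counter with early exit by filter-then-positional-index (objective: simpler).
-- ===== PORT A =====
-- A's loop: walk seq with a running match count n, return c when n reaches call_no.
def findCallGo (seat : String) (call_no : Int) : List (List (String × String)) → Int → Option (List (String × String))
  | [], _ => none
  | c :: rest, n =>
    if (PySem.Dict.mk c).getD "dealer" "" == seat then
      if n + 1 == call_no then some c else findCallGo seat call_no rest (n + 1)
    else findCallGo seat call_no rest n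

def find_call_py (seq : List (List (String × String))) (seat : String) (call_no : Int) : Option (List (String × String)) :=
  findCallGo seat call_no seq 0

-- ===== PORT B =====
-- Source B: build the list of matches, then index positionally; matches[call_no-1] under the
-- guard 1 ≤ call_no ≤ len(matches) is exactly pyGet? at a nonnegative index (none beyond the end).
def find_call_py_alt (seq : List (List (String × String))) (seat : String) (call_no : Int) : Option (List (String × String)) :=
  let ms := seq.filter (fun c => (PySem.Dict.mk c).getD "dealer" "" == seat)
  if 1 ≤ call_no then PySem.List.pyGet? ms (call_no - 1) else none

-- ===== PRECONDITION & SPEC =====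
def Spec_find_call_py (seq : List (List (String × String))) (seat : String) (call_no : Int) (out : Option (List (String × String))) : Prop := out = find_call_py_alt seq seat call_no
instance (seq : List (List (String × String))) (seat : String) (call_no : Int) (out : Option (List (String × String))) : Decidable (Spec_find_call_py seq seat call_no out) := by unfold Spec_find_call_py; infer_instance

-- ===== CLAIM (what is proved, stated in full; the proofs are below) =====
def Claim_equal_find_call_py : Prop := ∀ (seq : List (List (String × String))) (seat : String) (call_no : Int), Dom_find_call_py seq seat call_no → Spec_find_call_py seq seat call_no (find_call_py seq seat call_no)

-- ===== LEMMAS AND PROOFS =====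

-- A's loop with counter n finds the (call_no - n)-th match of the remaining list.
theorem findCallGo_eq (seat : String) (call_no : Int) (seq : List (List (String × String))) :
    ∀ n : Int, findCallGo seat call_no seq n =
      (if 1 ≤ call_no - n then
        PySem.List.pyGet? (seq.filter (fun c => (PySem.Dict.mk c).getD "dealer" "" == seat)) (call_no - n - 1)
      else none) := by
  induction seq with
  | nil => intro n; simp [findCallGo, PySem.List.pyGet?]
  | cons c rest ih =>
    intro n
    by_cases hc : ((PySem.Dict.mk c).getD "dealer" "" == seat) = true
    · by_cases he : n + 1 = call_no
      · have h0 : call_no - n - 1 = 0 := by omega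
        simp [findCallGo, hc, he, h0, show (1 : Int) ≤ call_no - n by omega]
      · simp only [findCallGo, List.filter_cons, hc, if_true, beq_iff_eq, he, if_false, ih (n + 1)]
        by_cases hge2 : 1 ≤ call_no - (n + 1)
        · rw [if_pos hge2, if_pos (by omega)]
          have hidx : call_no - n - 1 = (((call_no - n - 2).toNat : Int)) + 1 := by omega
          rw [hidx, PySem.List.pyGet?_cons_succ]
          congr 1
          omega
        · rw [if_neg hge2]
          by_cases hge : 1 ≤ call_no - n
          · exact absurd (by omega : n + 1 = call_no) he
          · rw [if_neg hge]
    · simp [findCallGo, hc, ih n]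

-- ===== VERDICT (by name: the statement is the Claim_ definition above) =====
theorem find_call_py_spec : Claim_equal_find_call_py := by
  intro seq seat call_no _
  unfold Spec_find_call_py find_call_py find_call_py_alt
  rw [findCallGo_eq]
  norm_num
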